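-- pv_equiv track=rewrite | github.com/Mappboy/advent-of-code-2020 | days/day14.py | generate_masks
-- ===== SOURCE A (Python) =====
-- def generate_masks(mask: str):
--     if "X" in mask:
--         mask1, mask2 = mask.replace("X", "0", 1), mask.replace("X", "1", 1)
--         masks = generate_masks(mask1)
--         masks += generate_masks(mask2)
--         if masks:
--             return masks
--         else:
--             return [mask1, mask2]
--     return []
-- ===== SOURCE B (Python) =====
-- def generate_masks(mask: str):
--     # Single left-to-right pass: extend every partial expansion by the next
--     # character ('0' and '1' for an 'X'); no X at all keeps A's [] result.
--     if "X" not in mask: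
--         return []
--     acc = [""]
--     for c in mask:
--         if c == "X":
--             acc = [s + b for s in acc for b in "01"]
--         else:
--             acc = [s + c for s in acc]
--     return acc
-- ===== Notes on version B (the rewrite author's own statement) =====
-- stated objective: alternative
-- what changed: Replaces A's binary recursion (replace the first X with 0/1 and recurse, with a fallback pair) by a single left-to-right fold that extends every partial expansion character by character, keeping A's empty result for masks without X.
import Mathlib
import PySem

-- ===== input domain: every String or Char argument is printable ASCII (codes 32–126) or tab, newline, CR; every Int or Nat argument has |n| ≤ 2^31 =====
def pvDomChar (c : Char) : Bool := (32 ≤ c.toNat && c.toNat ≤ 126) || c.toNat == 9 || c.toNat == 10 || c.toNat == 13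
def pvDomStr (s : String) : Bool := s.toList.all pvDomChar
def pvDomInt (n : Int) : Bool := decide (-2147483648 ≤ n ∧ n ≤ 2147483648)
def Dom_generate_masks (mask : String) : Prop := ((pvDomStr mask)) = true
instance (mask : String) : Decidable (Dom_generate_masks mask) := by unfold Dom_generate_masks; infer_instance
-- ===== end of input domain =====

-- B replaces A's first-X recursion by one left-to-right fold extending all partial
-- expansions (alternative decomposition; A's [] result for maskless-of-X input kept).

-- ===== PORT A =====
-- mask.replace("X", b, 1): replace the FIRST occurrence of the single char 'X'
-- (exact by hand; PySem.Str.replace has no count argument)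
def pvReplFirst : List Char → Char → List Char
  | [], _ => []
  | c :: cs, b => if c = 'X' then b :: cs else c :: pvReplFirst cs b

-- termination measure for A's recursion (cited by name in decreasing_by)
theorem pvCount_replFirst (cs : List Char) (b : Char) (hb : b ≠ 'X') (h : 'X' ∈ cs) :
    (pvReplFirst cs b).count 'X' + 1 = cs.count 'X' := by
  induction cs with
  | nil => cases h
  | cons c cs ih =>
    by_cases hc : c = 'X'
    · subst hc
      simp [pvReplFirst, hb]
    · rcases List.mem_cons.mp h with h | h
      · exact absurd h.symm hc
      · simp [pvReplFirst, hc, ← ih h]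

theorem pvIsIn_singleton (cs : List Char) :
    PySem.Chars.isIn ['X'] cs = true ↔ 'X' ∈ cs := by
  rw [PySem.Chars.isIn_iff_infix]
  exact List.singleton_infix_iff 'X' cs

def pvGenA (cs : List Char) : List (List Char) :=
  if h : PySem.Chars.isIn ['X'] cs then
    let mask1 := pvReplFirst cs '0'
    let mask2 := pvReplFirst cs '1'
    let masks := pvGenA mask1 ++ pvGenA mask2
    if masks ≠ [] then masks else [mask1, mask2]
  else []
termination_by cs.count 'X'
decreasing_by
  · have := pvCount_replFirst cs '0' (by decide) ((pvIsIn_singleton cs).mp h)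
    omega
  · have := pvCount_replFirst cs '1' (by decide) ((pvIsIn_singleton cs).mp h)
    omega

def generate_masks (mask : String) : List String :=
  (pvGenA mask.toList).map (fun cs => String.ofList cs)

-- ===== PORT B =====
def pvStep (acc : List (List Char)) (c : Char) : List (List Char) :=
  if c = 'X' then acc.flatMap (fun s => [s ++ ['0'], s ++ ['1']])
  else acc.map (fun s => s ++ [c])

def pvGenB (cs : List Char) : List (List Char) :=
  if PySem.Chars.isIn ['X'] cs then cs.foldl pvStep [[]]
  else []

def generate_masks_alt (mask : String) : List String :=
  (pvGenB mask.toList).map (fun cs => String.ofList cs)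

-- ===== PRECONDITION & SPEC =====
def Spec_generate_masks (mask : String) (out : List String) : Prop := out = generate_masks_alt mask
instance (mask : String) (out : List String) : Decidable (Spec_generate_masks mask out) := by unfold Spec_generate_masks; infer_instance

-- ===== CLAIM (what is proved, stated in full; the proofs are below) =====
def Claim_equal_generate_masks : Prop := ∀ (mask : String), Dom_generate_masks mask → Spec_generate_masks mask (generate_masks mask)

-- ===== LEMMAS AND PROOFS =====

theorem pvIsIn_singleton_false (cs : List Char) (h : 'X' ∉ cs) :
    PySem.Chars.isIn ['X'] cs = false := by
  rw [PySem.Chars.isIn_eq_false_iff]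
  exact fun hi => h ((List.singleton_infix_iff 'X' cs).mp hi)

-- the common characterisation: all expansions, leftmost X most significant, 0 before 1
def pvExpand : List Char → List (List Char)
  | [] => [[]]
  | c :: cs =>
    if c = 'X' then (pvExpand cs).map ('0' :: ·) ++ (pvExpand cs).map ('1' :: ·)
    else (pvExpand cs).map (c :: ·)

theorem pvExpand_ne_nil (cs : List Char) : pvExpand cs ≠ [] := by
  induction cs with
  | nil => simp [pvExpand]
  | cons c cs ih =>
    by_cases hc : c = 'X' <;> simp [pvExpand, hc, ih]

theorem pvExpand_of_not_mem (cs : List Char) (h : 'X' ∉ cs) : pvExpand cs = [cs] := by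
  induction cs with
  | nil => rfl
  | cons c cs ih =>
    have hc : c ≠ 'X' := fun hc => h (hc ▸ List.mem_cons_self)
    have := ih (fun hm => h (List.mem_cons_of_mem c hm))
    simp [pvExpand, hc, this]

theorem pvExpand_split (cs : List Char) (h : 'X' ∈ cs) :
    pvExpand cs = pvExpand (pvReplFirst cs '0') ++ pvExpand (pvReplFirst cs '1') := by
  induction cs with
  | nil => cases h
  | cons c cs ih =>
    by_cases hc : c = 'X'
    · subst hc
      simp [pvReplFirst, pvExpand]
    · rcases List.mem_cons.mp h with h | h
      · exact absurd h.symm hc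
      · simp [pvReplFirst, hc, pvExpand, ih h, List.map_append]

theorem pvGenA_eq_expand (n : Nat) : ∀ cs : List Char, cs.count 'X' = n → 'X' ∈ cs →
    pvGenA cs = pvExpand cs := by
  induction n using Nat.strong_induction_on with
  | _ n ih =>
    intro cs hn h
    have hiso : PySem.Chars.isIn ['X'] cs = true := (pvIsIn_singleton cs).mpr h
    have h0 := pvCount_replFirst cs '0' (by decide) h
    have h1 := pvCount_replFirst cs '1' (by decide) h
    rw [pvGenA]
    simp only [hiso, dite_true]
    by_cases hm : 'X' ∈ pvReplFirst cs '0'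
    · -- at least two X's: both halves recurse to full expansions, nonempty
      have hm1 : 'X' ∈ pvReplFirst cs '1' := by
        have c1 : 0 < (pvReplFirst cs '1').count 'X' := by
          have := List.count_pos_iff.mpr hm
          omega
        exact List.count_pos_iff.mp c1
      have e0 := ih ((pvReplFirst cs '0').count 'X') (by omega) _ rfl hm
      have e1 := ih ((pvReplFirst cs '1').count 'X') (by omega) _ rfl hm1
      have hne : pvGenA (pvReplFirst cs '0') ++ pvGenA (pvReplFirst cs '1') ≠ [] := by
        rw [e0, e1]
        intro hnil
        exact pvExpand_ne_nil _ (List.append_eq_nil_iff.mp hnil).1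
      rw [if_pos hne]
      rw [e0, e1, ← pvExpand_split cs h]
    · -- exactly one X: both halves return [], fallback pair
      have hm1 : 'X' ∉ pvReplFirst cs '1' := by
        intro hx
        have := List.count_pos_iff.mpr hx
        have := List.count_eq_zero.mpr hm
        omega
      have g0 : pvGenA (pvReplFirst cs '0') = [] := by
        rw [pvGenA]
        simp [pvIsIn_singleton_false _ hm]
      have g1 : pvGenA (pvReplFirst cs '1') = [] := by
        rw [pvGenA]
        simp [pvIsIn_singleton_false _ hm1]
      rw [pvExpand_split cs h, pvExpand_of_not_mem _ hm, pvExpand_of_not_mem _ hm1]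
      simp [g0, g1]

theorem pvFoldl_step (cs : List Char) : ∀ acc : List (List Char),
    cs.foldl pvStep acc = acc.flatMap (fun s => (pvExpand cs).map (s ++ ·)) := by
  induction cs with
  | nil =>
    intro acc
    simp [pvExpand]
  | cons c cs ih =>
    intro acc
    rw [List.foldl_cons, ih]
    by_cases hc : c = 'X'
    · subst hc
      simp only [pvStep, if_pos, pvExpand, List.flatMap_assoc]
      congr 1
      funext s
      simp [List.map_map, Function.comp_def]
    · simp only [pvStep, if_neg hc, pvExpand, List.flatMap_map]
      congr 1
      funext s
      simp [List.map_map, Function.comp_def]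

theorem pvGenB_eq_expand (cs : List Char) (h : 'X' ∈ cs) : pvGenB cs = pvExpand cs := by
  rw [pvGenB, if_pos ((pvIsIn_singleton cs).mpr h), pvFoldl_step]
  simp

-- ===== VERDICT (by name: the statement is the Claim_ definition above) =====
theorem generate_masks_spec : Claim_equal_generate_masks := by
  intro mask _
  unfold Spec_generate_masks generate_masks generate_masks_alt
  by_cases h : 'X' ∈ mask.toList
  · rw [pvGenA_eq_expand (mask.toList.count 'X') mask.toList rfl h, pvGenB_eq_expand _ h]
  · have hiso := pvIsIn_singleton_false mask.toList h
    rw [pvGenA, pvGenB]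
    simp [hiso]
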